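-- pv_equiv track=rewrite | github.com/DCP-arca/NAI-Tag-Viewer | prompt_converter.py | find_word_bounds
-- ===== SOURCE A (Python) =====
-- def find_word_bounds(token, token_offset):
--     """
--     Get word bounds inside a token, ignoring spaces and brackets
--     Returns the actual start, end index (based on original string)
--     """
--     # Left to right search: skip spaces and { } [ ]
--     left = 0
--     while left < len(token) and token[left] in " \t{}[]":
--         left += 1
--     # Right to left search
--     right = len(token) - 1
--     while right >= 0 and token[right] in " \t{}[]":
--         right -= 1
--     if left > right:
--         # If no word, use the entire token
--         return token_offset, token_offset + len(token) - 1
--     return token_offset + left, token_offset + right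
-- ===== SOURCE B (Python) =====
-- def find_word_bounds(token, token_offset):
--     """
--     Get word bounds inside a token, ignoring spaces and brackets
--     Returns the actual start, end index (based on original string)
--     """
--     # Single forward pass tracking first and last non-skip indices
--     first = None
--     last = None
--     for i, ch in enumerate(token):
--         if ch not in " \t{}[]":
--             if first is None:
--                 first = i
--             last = i
--     if first is None:
--         # If no word, use the entire token
--         return token_offset, token_offset + len(token) - 1
--     return token_offset + first, token_offset + last
-- ===== Notes on version B (the rewrite author's own statement) =====
-- stated objective: alternative
-- what changed: Replaces the two converging end-scans (left-to-right and right-to-left while loops) with a single forward enumerate pass that tracks the first and last non-skip indices, mapping the 'no word found' case to first is None.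
import Mathlib
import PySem

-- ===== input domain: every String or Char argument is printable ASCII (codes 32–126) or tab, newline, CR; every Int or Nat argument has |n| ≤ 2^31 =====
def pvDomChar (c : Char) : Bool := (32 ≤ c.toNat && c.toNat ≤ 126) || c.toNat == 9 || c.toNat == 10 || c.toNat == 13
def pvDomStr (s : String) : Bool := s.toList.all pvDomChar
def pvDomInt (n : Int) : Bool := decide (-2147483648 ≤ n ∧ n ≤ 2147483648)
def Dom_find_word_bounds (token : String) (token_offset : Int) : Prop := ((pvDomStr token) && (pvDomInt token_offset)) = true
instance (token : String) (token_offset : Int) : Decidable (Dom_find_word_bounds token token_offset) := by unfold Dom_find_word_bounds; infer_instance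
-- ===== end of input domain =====

-- B replaces A's two converging end-scans by one forward pass tracking the first/last non-skip index (alternative decomposition, same cost).

-- characters skipped by both programs: the set " \t{}[]"
def pvSkip (c : Char) : Bool := c ∈ ([' ', '\t', '{', '}', '[', ']'] : List Char)

-- ===== PORT A =====
-- A's left-to-right while loop: number of leading skip characters
def pvLeftScan : List Char → Nat
  | [] => 0
  | c :: rest => if pvSkip c then pvLeftScan rest + 1 else 0

-- A's right-to-left while loop; the fuel r is (current index + 1), result is the index reached (or -1)
def pvRightScan (cs : List Char) : Nat → Int
  | 0 => -1
  | r + 1 => if pvSkip (cs.getD r ' ') then pvRightScan cs r else (r : Int)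

def find_word_bounds (token : String) (token_offset : Int) : Int × Int :=
  let cs := token.toList
  let left : Int := pvLeftScan cs
  let right : Int := pvRightScan cs cs.length
  if left > right then (token_offset, token_offset + cs.length - 1)
  else (token_offset + left, token_offset + right)

-- ===== PORT B =====
-- B's loop body: state is (first, last), updated at each non-skip (index, char) pair
def pvStep (st : Option Int × Option Int) (p : Int × Char) : Option Int × Option Int :=
  if pvSkip p.2 then st
  else ((if st.1 = none then some p.1 else st.1), some p.1)

def find_word_bounds_alt (token : String) (token_offset : Int) : Int × Int :=
  let cs := token.toList
  let st := (PySem.List.enumerate cs 0).foldl pvStep (none, none)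
  match st with
  | (some f, some l) => (token_offset + f, token_offset + l)
  | _ => (token_offset, token_offset + (cs.length : Int) - 1)

-- ===== PRECONDITION & SPEC =====
def Spec_find_word_bounds (token : String) (token_offset : Int) (out : Int × Int) : Prop := out = find_word_bounds_alt token token_offset
instance (token : String) (token_offset : Int) (out : Int × Int) : Decidable (Spec_find_word_bounds token token_offset out) := by unfold Spec_find_word_bounds; infer_instance

-- ===== CLAIM (what is proved, stated in full; the proofs are below) =====
def Claim_equal_find_word_bounds : Prop := ∀ (token : String) (token_offset : Int), Dom_find_word_bounds token token_offset → Spec_find_word_bounds token token_offset (find_word_bounds token token_offset)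

-- ===== LEMMAS AND PROOFS =====

-- index of the first non-skip character (spec helper)
def pvFirstNS : List Char → Option Nat
  | [] => none
  | c :: rest => if pvSkip c then (pvFirstNS rest).map (· + 1) else some 0

-- index of the last non-skip character (spec helper)
def pvLastNS : List Char → Option Nat
  | [] => none
  | c :: rest =>
    match pvLastNS rest with
    | some l => some (l + 1)
    | none => if pvSkip c then none else some 0

theorem pvLeftScan_eq (cs : List Char) :
    pvLeftScan cs = (pvFirstNS cs).getD cs.length := by
  induction cs with
  | nil => rfl
  | cons c rest ih =>
    simp only [pvLeftScan, pvFirstNS]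
    by_cases h : pvSkip c
    · rw [if_pos h, if_pos h, ih]
      cases pvFirstNS rest <;> simp
    · rw [if_neg h, if_neg h]; rfl

theorem pvLastNS_append (ys : List Char) (c : Char) :
    pvLastNS (ys ++ [c]) = if pvSkip c then pvLastNS ys else some ys.length := by
  induction ys with
  | nil => by_cases h : pvSkip c <;> simp [pvLastNS, h]
  | cons y rest ih =>
    simp only [List.cons_append, pvLastNS, ih]
    by_cases h : pvSkip c
    · rw [if_pos h, if_pos h]
    · rw [if_neg h, if_neg h]; simp

theorem pvRightScan_append (pre : List Char) : ∀ suf : List Char,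
    pvRightScan (pre ++ suf) pre.length =
      (match pvLastNS pre with | some l => (l : Int) | none => -1) := by
  induction pre using List.reverseRecOn with
  | nil => intro suf; rfl
  | append_singleton ys c ih =>
    intro suf
    have hlen : (ys ++ [c]).length = ys.length + 1 := by simp
    have hget : ((ys ++ [c]) ++ suf).getD ys.length ' ' = c := by
      simp [List.getD]
    rw [hlen, pvRightScan, hget]
    by_cases h : pvSkip c
    · have hassoc : (ys ++ [c]) ++ suf = ys ++ ([c] ++ suf) := by simp
      rw [if_pos h, hassoc, ih ([c] ++ suf), pvLastNS_append, if_pos h]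
    · rw [if_neg h, pvLastNS_append, if_neg h]

theorem pvRightScan_eq (cs : List Char) :
    pvRightScan cs cs.length =
      (match pvLastNS cs with | some l => (l : Int) | none => -1) := by
  have h := pvRightScan_append cs []
  simpa using h

theorem pvFoldB_char (cs : List Char) : ∀ (s : Int) (f0 l0 : Option Int),
    (PySem.List.enumerate cs s).foldl pvStep (f0, l0) =
      ((match f0 with
        | some f => some f
        | none => (pvFirstNS cs).map (fun k => s + (k : Int))),
       (match pvLastNS cs with
        | some l => some (s + (l : Int))
        | none => l0)) := by
  induction cs with
  | nil =>
    intro s f0 l0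
    cases f0 <;> simp [pvFirstNS, pvLastNS, PySem.List.enumerate_nil]
  | cons c rest ih =>
    intro s f0 l0
    rw [PySem.List.enumerate_cons, List.foldl_cons]
    by_cases h : pvSkip c
    · rw [show pvStep (f0, l0) (s, c) = (f0, l0) by simp [pvStep, h]]
      rw [ih (s + 1) f0 l0]
      simp only [pvFirstNS, pvLastNS, h, if_pos]
      cases f0 <;> cases hl : pvLastNS rest <;> cases hf : pvFirstNS rest <;>
        simp <;> omega
    · rw [show pvStep (f0, l0) (s, c) =
            ((if f0 = none then some s else f0), some s) by simp [pvStep, h]]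
      rw [ih (s + 1) _ _]
      simp only [pvFirstNS, pvLastNS, h]
      cases f0 <;> cases hl : pvLastNS rest <;>
        simp <;> try omega

theorem pvFirstNS_none_iff (cs : List Char) : pvFirstNS cs = none ↔ pvLastNS cs = none := by
  induction cs with
  | nil => simp [pvFirstNS, pvLastNS]
  | cons c rest ih =>
    simp only [pvFirstNS, pvLastNS]
    by_cases h : pvSkip c
    · rw [if_pos h]
      cases hl : pvLastNS rest <;> cases hf : pvFirstNS rest <;>
        simp_all
    · rw [if_neg h]
      cases hl : pvLastNS rest <;> simp [h]

theorem pvFirstNS_le_lastNS (cs : List Char) :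
    ∀ f l, pvFirstNS cs = some f → pvLastNS cs = some l → f ≤ l := by
  induction cs with
  | nil => intro f l hf; simp [pvFirstNS] at hf
  | cons c rest ih =>
    intro f l hf hl
    simp only [pvFirstNS, pvLastNS] at hf hl
    by_cases h : pvSkip c
    · rw [if_pos h] at hf
      cases hfr : pvFirstNS rest with
      | none => rw [hfr] at hf; simp at hf
      | some f' =>
        cases hlr : pvLastNS rest with
        | none =>
          exact absurd ((pvFirstNS_none_iff rest).2 hlr) (by simp [hfr])
        | some l' =>
          rw [hfr] at hf; rw [hlr] at hl
          simp at hf hl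
          have := ih f' l' hfr hlr
          omega
    · rw [if_neg h] at hf
      cases hlr : pvLastNS rest with
      | none =>
        rw [hlr] at hl; rw [if_neg h] at hl
        simp at hf hl
        omega
      | some l' =>
        rw [hlr] at hl
        simp at hf hl
        omega

-- ===== VERDICT (by name: the statement is the Claim_ definition above) =====
theorem find_word_bounds_spec : Claim_equal_find_word_bounds := by
  intro token token_offset _
  unfold Spec_find_word_bounds find_word_bounds find_word_bounds_alt
  dsimp only
  rw [pvFoldB_char token.toList 0 none none, pvLeftScan_eq, pvRightScan_eq]
  cases hf : pvFirstNS token.toList with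
  | none =>
    rw [(pvFirstNS_none_iff token.toList).1 hf]
    simp only [Option.getD_none]
    rw [if_pos (by omega)]
    simp
  | some f =>
    cases hl : pvLastNS token.toList with
    | none => exact absurd ((pvFirstNS_none_iff token.toList).2 hl) (by simp [hf])
    | some l =>
      have hle := pvFirstNS_le_lastNS token.toList f l hf hl
      simp only [Option.getD_some]
      rw [if_neg (by omega)]
      simp
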